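-- pv_equiv track=rewrite | github.com/ligavnik/scoutai-football-bot | server.py | find_team
-- ===== SOURCE A (Python) =====
-- def find_team(teams, query):
--     q = query.lower().strip()
--     for t in teams:
--         for f in [t.get("name",""), t.get("shortName",""), t.get("tla","")]:
--             if f.lower() == q: return t
--     for t in teams:
--         for f in [t.get("name",""), t.get("shortName","")]:
--             if q in f.lower() or f.lower() in q: return t
--     q0 = q.split()[0]
--     for t in teams:
--         if any(w.startswith(q0) for w in t.get("name","").lower().split()):
--             return t
--     return None
-- ===== SOURCE B (Python) =====
-- def find_team(teams, query):
--     q = query.lower().strip()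
--     first_sub = None
--     first_pre = None
--     for t in teams:
--         name = t.get("name", "").lower()
--         short = t.get("shortName", "").lower()
--         tla = t.get("tla", "").lower()
--         if q == name or q == short or q == tla:
--             return t
--         if first_sub is None and (q in name or name in q or q in short or short in q):
--             first_sub = t
--         if first_sub is None and first_pre is None and any(
--                 w.startswith(q.split()[0]) for w in name.split()):
--             first_pre = t
--     return first_sub if first_sub is not None else first_pre
-- ===== Notes on version B (the rewrite author's own statement) =====
-- stated objective: alternative
-- what changed: A makes three sequential full scans over teams (exact tier, then substring tier, then word-prefix tier); B makes a single pass that returns immediately on an exact match and records the first substring hit and first prefix hit in two slots, choosing among them after the loop.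
import Mathlib
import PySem

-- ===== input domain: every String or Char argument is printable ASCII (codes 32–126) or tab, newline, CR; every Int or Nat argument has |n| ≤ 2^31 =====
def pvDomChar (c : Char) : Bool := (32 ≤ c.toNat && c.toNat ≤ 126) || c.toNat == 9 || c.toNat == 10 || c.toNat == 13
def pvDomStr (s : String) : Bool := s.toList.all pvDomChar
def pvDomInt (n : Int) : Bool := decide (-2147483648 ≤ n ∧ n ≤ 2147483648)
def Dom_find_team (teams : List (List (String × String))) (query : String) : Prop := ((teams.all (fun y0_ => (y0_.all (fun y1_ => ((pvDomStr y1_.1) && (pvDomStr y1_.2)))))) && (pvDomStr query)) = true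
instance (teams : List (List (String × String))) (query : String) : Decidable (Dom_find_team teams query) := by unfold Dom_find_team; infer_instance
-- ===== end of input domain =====

-- B replaces A's three sequential full scans by ONE pass that returns on an exact hit and
-- records the first substring/prefix hits in two slots (objective: alternative decomposition;
-- return value only, neither version mutates its arguments).

-- ===== PORT A =====
def find_team (teams : List (List (String × String))) (query : String) : Option (List (String × String)) :=
  let q := PySem.Str.strip (PySem.Str.lower query)
  match teams.find? (fun t =>
      ([(PySem.Dict.mk t).getD "name" "", (PySem.Dict.mk t).getD "shortName" "", (PySem.Dict.mk t).getD "tla" ""]).any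
        (fun f => PySem.Str.lower f == q)) with
  | some t => some t
  | none =>
    match teams.find? (fun t =>
        ([(PySem.Dict.mk t).getD "name" "", (PySem.Dict.mk t).getD "shortName" ""]).any
          (fun f => PySem.Str.isIn q (PySem.Str.lower f) || PySem.Str.isIn (PySem.Str.lower f) q)) with
    | some t => some t
    | none =>
      match (PySem.Str.split₀ q).head? with
      | none => none  -- Python raises IndexError here (q.split()[0] on empty list); excluded by Pre_
      | some q0 =>
        teams.find? (fun t =>
          (PySem.Str.split₀ (PySem.Str.lower ((PySem.Dict.mk t).getD "name" ""))).any
            (fun w => PySem.Str.startswith w q0))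

-- ===== PORT B =====
def findTeamLoop (q : String) (teams : List (List (String × String)))
    (firstSub firstPre : Option (List (String × String))) : Option (List (String × String)) :=
  match teams with
  | [] => match firstSub with | some t => some t | none => firstPre
  | t :: rest =>
    let name := PySem.Str.lower ((PySem.Dict.mk t).getD "name" "")
    let short := PySem.Str.lower ((PySem.Dict.mk t).getD "shortName" "")
    let tla := PySem.Str.lower ((PySem.Dict.mk t).getD "tla" "")
    if q == name || q == short || q == tla then some t
    else
      let firstSub' := if firstSub.isNone &&
          (PySem.Str.isIn q name || PySem.Str.isIn name q ||
           PySem.Str.isIn q short || PySem.Str.isIn short q)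
        then some t else firstSub
      let firstPre' := if firstSub'.isNone && firstPre.isNone &&
          (match (PySem.Str.split₀ q).head? with
           | some q0 => (PySem.Str.split₀ name).any (fun w => PySem.Str.startswith w q0)
           | none => false)  -- unreachable in B: q = "" sets firstSub' on the same team
        then some t else firstPre
      findTeamLoop q rest firstSub' firstPre'

def find_team_alt (teams : List (List (String × String))) (query : String) : Option (List (String × String)) :=
  findTeamLoop (PySem.Str.strip (PySem.Str.lower query)) teams none none

-- ===== PRECONDITION & SPEC =====
-- Pre_ excludes only the inputs where A raises: empty teams together with a whitespace-only query
-- (then A's third tier evaluates q.split()[0] on an empty list → IndexError).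
def Pre_find_team (teams : List (List (String × String))) (query : String) : Prop :=
  ¬ (teams = [] ∧ PySem.Str.strip (PySem.Str.lower query) = "")
instance (teams : List (List (String × String))) (query : String) : Decidable (Pre_find_team teams query) := by unfold Pre_find_team; infer_instance
def pvWitness_find_team : (List (List (String × String))) × String := ([[("name", "FC Foo")]], "fc foo")

def Spec_find_team (teams : List (List (String × String))) (query : String) (out : Option (List (String × String))) : Prop := out = find_team_alt teams query
instance (teams : List (List (String × String))) (query : String) (out : Option (List (String × String))) : Decidable (Spec_find_team teams query out) := by unfold Spec_find_team; infer_instance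

-- ===== CLAIM (what is proved, stated in full; the proofs are below) =====
def Claim_equal_find_team : Prop := ∀ (teams : List (List (String × String))) (query : String), Dom_find_team teams query → Pre_find_team teams query → Spec_find_team teams query (find_team teams query)
-- ===== LEMMAS AND PROOFS =====

-- Predicates of the three tiers, written in the exact shape B's loop tests them.
def teamE (q : String) (t : List (String × String)) : Bool :=
  q == PySem.Str.lower ((PySem.Dict.mk t).getD "name" "") ||
  q == PySem.Str.lower ((PySem.Dict.mk t).getD "shortName" "") ||
  q == PySem.Str.lower ((PySem.Dict.mk t).getD "tla" "")

def teamS (q : String) (t : List (String × String)) : Bool :=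
  PySem.Str.isIn q (PySem.Str.lower ((PySem.Dict.mk t).getD "name" "")) ||
  PySem.Str.isIn (PySem.Str.lower ((PySem.Dict.mk t).getD "name" "")) q ||
  PySem.Str.isIn q (PySem.Str.lower ((PySem.Dict.mk t).getD "shortName" "")) ||
  PySem.Str.isIn (PySem.Str.lower ((PySem.Dict.mk t).getD "shortName" "")) q

def teamP (q : String) (t : List (String × String)) : Bool :=
  match (PySem.Str.split₀ q).head? with
  | some q0 => (PySem.Str.split₀ (PySem.Str.lower ((PySem.Dict.mk t).getD "name" ""))).any
      (fun w => PySem.Str.startswith w q0)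
  | none => false

theorem loop_cons (q : String) (t : List (String × String)) (rest : List (List (String × String)))
    (fs fp : Option (List (String × String))) :
    findTeamLoop q (t :: rest) fs fp =
      if teamE q t then some t
      else
        findTeamLoop q rest
          (if fs.isNone && teamS q t then some t else fs)
          (if (if fs.isNone && teamS q t then some t else fs).isNone && fp.isNone && teamP q t
            then some t else fp) := rfl

theorem loop_eq (q : String) (l : List (List (String × String)))
    (fs fp : Option (List (String × String))) :
    findTeamLoop q l fs fp =
      match l.find? (teamE q) with
      | some t => some t
      | none =>
        match fs with
        | some t => some t
        | none =>
          match l.find? (teamS q) with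
          | some t => some t
          | none => match fp with | some t => some t | none => l.find? (teamP q) := by
  induction l generalizing fs fp with
  | nil => cases fs <;> cases fp <;> simp [findTeamLoop, List.find?]
  | cons t rest ih =>
    rw [loop_cons, ih]
    cases hE : teamE q t with
    | true => simp [List.find?_cons, hE]
    | false =>
      rw [List.find?_cons_of_neg (by simp [hE])]
      rw [if_neg (by simp [hE])]
      cases fs with
      | some t0 => simp
      | none =>
        cases hS : teamS q t with
        | true =>
          rw [List.find?_cons_of_pos hS]
          simp only [Option.isNone_none, Bool.true_and, if_true, Option.isNone_some,
            Bool.false_and, if_false]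
        | false =>
          rw [List.find?_cons_of_neg (by simp [hS])]
          simp only [hS, Bool.and_false, Bool.false_and, Option.isNone_none, Bool.true_and,
            if_false]
          cases fp with
          | some t1 => simp
          | none =>
            cases hP : teamP q t with
            | true =>
              rw [List.find?_cons_of_pos hP]
              simp only [hP, Option.isNone_none, Bool.true_and, Bool.and_true, if_true]
              cases rest.find? (teamE q) <;> cases rest.find? (teamS q) <;> simp
            | false =>
              rw [List.find?_cons_of_neg (by simp [hP])]
              simp [hP]

theorem predE_eq (q : String) :
    (fun t => ([(PySem.Dict.mk t).getD "name" "", (PySem.Dict.mk t).getD "shortName" "",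
        (PySem.Dict.mk t).getD "tla" ""]).any (fun f => PySem.Str.lower f == q)) = teamE q := by
  funext t
  apply Bool.eq_iff_iff.mpr
  simp only [teamE, List.any_cons, List.any_nil, Bool.or_false, Bool.or_eq_true, beq_iff_eq, or_assoc]
  constructor
  · rintro (h | h | h)
    exacts [Or.inl h.symm, Or.inr (Or.inl h.symm), Or.inr (Or.inr h.symm)]
  · rintro (h | h | h)
    exacts [Or.inl h.symm, Or.inr (Or.inl h.symm), Or.inr (Or.inr h.symm)]

theorem predS_eq (q : String) :
    (fun t => ([(PySem.Dict.mk t).getD "name" "", (PySem.Dict.mk t).getD "shortName" ""]).any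
        (fun f => PySem.Str.isIn q (PySem.Str.lower f) || PySem.Str.isIn (PySem.Str.lower f) q)) = teamS q := by
  funext t
  simp only [teamS, List.any_cons, List.any_nil, Bool.or_false, Bool.or_assoc]

theorem find?_false (l : List (List (String × String))) :
    l.find? (fun _ => false) = none := by
  induction l with
  | nil => rfl
  | cons t rest ih => simpa [List.find?_cons] using ih

-- ===== VERDICT (by name: the statement is the Claim_ definition above) =====
theorem find_team_spec : Claim_equal_find_team := by
  intro teams query _ _
  unfold Spec_find_team find_team find_team_alt
  rw [loop_eq]
  simp only [predE_eq, predS_eq]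
  cases hE : teams.find? (teamE (PySem.Str.strip (PySem.Str.lower query))) with
  | some t => simp [hE]
  | none =>
    simp only [hE]
    cases hS : teams.find? (teamS (PySem.Str.strip (PySem.Str.lower query))) with
    | some t => simp [hS]
    | none =>
      simp only [hS]
      cases hQ : (PySem.Str.split₀ (PySem.Str.strip (PySem.Str.lower query))).head? with
      | none =>
        have hfun : teamP (PySem.Str.strip (PySem.Str.lower query)) = fun _ => false := by
          funext t; simp [teamP, hQ]
        simp only [hQ, hfun, find?_false]
      | some q0 =>
        have hfun : teamP (PySem.Str.strip (PySem.Str.lower query)) =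
            fun t => (PySem.Str.split₀ (PySem.Str.lower ((PySem.Dict.mk t).getD "name" ""))).any
              (fun w => PySem.Str.startswith w q0) := by
          funext t; simp [teamP, hQ]
        simp only [hQ, hfun]
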